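-- pv_equiv track=rewrite | github.com/waelkarman/hackerrank-leetcode-datastructure | Random coding challenge/PichingNumbers.py | pickingNumbers
-- ===== SOURCE A (Python) =====
-- def pickingNumbers(a):
--     # Write your code here
--     minarr = []
--     maxarr = []
--     first = True
--     maxval=0
--
--     for j in range(len(a)):
--         for i in a[j:len(a)]:
--             if first:
--                 minarr.append(i)
--                 maxarr.append(i)
--                 first = False
--             else:
--                 if(i == minarr[0]):
--                     minarr.append(i)
--                     maxarr.append(i)
--
--                 if(minarr[0]-i)==-1:
--                     minarr.append(i)
--
--                 if(minarr[0]-i)==1: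
--                     maxarr.append(i)
--
--         if(len(minarr)>maxval):
--             maxval= len(minarr)
--         if(len(maxarr)>maxval):
--             maxval= len(maxarr)
--         minarr.clear()
--         maxarr.clear()
--         first=True
--
--     return maxval
-- ===== SOURCE B (Python) =====
-- def pickingNumbers(a):
--     # One counting pass + one pass over the distinct values:
--     # the best subarray picks all occurrences of some v and of v+1.
--     freq = {}
--     for x in a:
--         freq[x] = freq.get(x, 0) + 1
--     best = 0
--     for v, c in freq.items():
--         t = c + freq.get(v + 1, 0)
--         if t > best:
--             best = t
--     return best
-- ===== Notes on version B (the rewrite author's own statement) =====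
-- stated objective: faster
-- what changed: Replaces A's quadratic scan of every suffix (rebuilding min/max candidate lists per start index) with a single frequency count followed by max over distinct v of freq[v]+freq[v+1].
import Mathlib
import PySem

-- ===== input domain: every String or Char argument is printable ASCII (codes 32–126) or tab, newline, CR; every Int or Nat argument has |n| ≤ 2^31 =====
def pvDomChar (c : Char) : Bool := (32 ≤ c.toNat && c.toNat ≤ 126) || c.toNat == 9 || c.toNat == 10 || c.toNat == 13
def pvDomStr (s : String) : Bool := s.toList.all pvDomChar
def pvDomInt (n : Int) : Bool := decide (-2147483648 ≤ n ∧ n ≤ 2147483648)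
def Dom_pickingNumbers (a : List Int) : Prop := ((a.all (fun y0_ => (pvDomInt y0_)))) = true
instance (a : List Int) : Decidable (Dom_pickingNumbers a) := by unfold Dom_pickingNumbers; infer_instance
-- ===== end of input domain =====

-- B replaces A's quadratic per-suffix scan by one frequency count plus a pass over the
-- distinct values (answer = max over v of freq[v]+freq[v+1]); objective: faster (asymptotic).

-- ===== PORT A =====
-- inner loop body of A: state is (minarr, maxarr, first); Python's minarr[0] is read via
-- pyGetD (minarr is nonempty whenever the else-branch runs, so this is exact there)
def pickingNumbersStep (s : List Int × List Int × Bool) (i : Int) : List Int × List Int × Bool :=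
  if s.2.2 then (s.1 ++ [i], s.2.1 ++ [i], false)
  else
    let s1 := if i == PySem.List.pyGetD s.1 0 0 then (s.1 ++ [i], s.2.1 ++ [i]) else (s.1, s.2.1)
    let s2 := if PySem.List.pyGetD s1.1 0 0 - i == -1 then (s1.1 ++ [i], s1.2) else s1
    let s3 := if PySem.List.pyGetD s2.1 0 0 - i == 1 then (s2.1, s2.2 ++ [i]) else s2
    (s3.1, s3.2, false)

-- outer loop body of A: state is (minarr, maxarr, first, maxval)
def pickingNumbersOuter (a : List Int) (st : List Int × List Int × Bool × Int) (j : Int) :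
    List Int × List Int × Bool × Int :=
  let inner := (PySem.List.slice a (some j) (some (a.length : Int))).foldl
    pickingNumbersStep (st.1, st.2.1, st.2.2.1)
  let maxval := st.2.2.2
  let maxval := if (inner.1.length : Int) > maxval then (inner.1.length : Int) else maxval
  let maxval := if (inner.2.1.length : Int) > maxval then (inner.2.1.length : Int) else maxval
  ([], [], true, maxval)

def pickingNumbers (a : List Int) : Int :=
  ((PySem.List.pyRange 0 (a.length : Int) 1).foldl (pickingNumbersOuter a)
    ([], [], true, 0)).2.2.2

-- ===== PORT B =====
def pickingNumbers_alt (a : List Int) : Int :=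
  let freq := a.foldl (fun (d : PySem.Dict Int Int) x => d.insert x (d.getD x 0 + 1))
    PySem.Dict.empty
  freq.items.foldl (fun best p =>
    let t := p.2 + freq.getD (p.1 + 1) 0
    if t > best then t else best) 0

-- ===== PRECONDITION & SPEC =====
def Spec_pickingNumbers (a : List Int) (out : Int) : Prop := out = pickingNumbers_alt a
instance (a : List Int) (out : Int) : Decidable (Spec_pickingNumbers a out) := by unfold Spec_pickingNumbers; infer_instance

-- ===== CLAIM (what is proved, stated in full; the proofs are below) =====
def Claim_equal_pickingNumbers : Prop := ∀ (a : List Int), Dom_pickingNumbers a → Spec_pickingNumbers a (pickingNumbers a)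

-- ===== LEMMAS AND PROOFS =====

-- score of a value v in list l: (#occurrences of v) + (#occurrences of v+1), as Int
def tv (l : List Int) (v : Int) : Int := (l.count v : Int) + (l.count (v + 1) : Int)

-- the max of the two candidate-list lengths A's inner loop produces at start index j
def fA (a : List Int) (j : Int) : Int :=
  max (((PySem.List.slice a (some j) (some (a.length : Int))).foldl
          pickingNumbersStep ([], [], true)).1.length : Int)
      (((PySem.List.slice a (some j) (some (a.length : Int))).foldl
          pickingNumbersStep ([], [], true)).2.1.length : Int)

theorem step_v (v : Int) (t M : List Int) :
    pickingNumbersStep (v :: t, M, false) v = (v :: (t ++ [v]), M ++ [v], false) := by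
  simp [pickingNumbersStep, List.cons_append]

theorem step_v1 (v : Int) (t M : List Int) :
    pickingNumbersStep (v :: t, M, false) (v + 1) = (v :: (t ++ [v + 1]), M, false) := by
  simp [pickingNumbersStep, List.cons_append]

theorem step_vm1 (v : Int) (t M : List Int) :
    pickingNumbersStep (v :: t, M, false) (v - 1) = (v :: t, M ++ [v - 1], false) := by
  simp [pickingNumbersStep]

theorem step_other (v i : Int) (t M : List Int) (h1 : i ≠ v) (h2 : i ≠ v + 1) (h3 : i ≠ v - 1) :
    pickingNumbersStep (v :: t, M, false) i = (v :: t, M, false) := by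
  simp [pickingNumbersStep, h1,
    show v - i ≠ -1 by omega, show v - i ≠ 1 by omega]

-- generic characterisation of a running-max fold
theorem foldl_max_spec {α : Type} (f : α → Int) (l : List α) (init : Int) :
    init ≤ l.foldl (fun acc x => if f x > acc then f x else acc) init ∧
    (∀ x ∈ l, f x ≤ l.foldl (fun acc x => if f x > acc then f x else acc) init) ∧
    (l.foldl (fun acc x => if f x > acc then f x else acc) init = init ∨
      ∃ x ∈ l, l.foldl (fun acc x => if f x > acc then f x else acc) init = f x) := by
  induction l generalizing init with
  | nil => simp
  | cons y ys ih =>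
    simp only [List.foldl_cons]
    rcases ih (if f y > init then f y else init) with ⟨h1, h2, h3⟩
    refine ⟨?_, ?_, ?_⟩
    · exact le_trans (by split <;> omega) h1
    · intro x hx
      rcases List.mem_cons.mp hx with hx | hx
      · exact le_trans (by subst hx; split <;> omega) h1
      · exact h2 x hx
    · rcases h3 with h3 | h3
      · by_cases hy : f y > init
        · exact Or.inr ⟨y, by simp, by rw [h3]; simp [hy]⟩
        · exact Or.inl (by rw [h3]; simp [hy])
      · rcases h3 with ⟨x, hx, hfx⟩
        exact Or.inr ⟨x, by simp [hx], hfx⟩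

-- the inner loop of A, started after the first element v, counts v/v±1 into the lengths
theorem inner_spec (rest : List Int) (v : Int) : ∀ t M : List Int,
    ((rest.foldl pickingNumbersStep (v :: t, M, false)).1.length
        = t.length + 1 + rest.count v + rest.count (v + 1)) ∧
    ((rest.foldl pickingNumbersStep (v :: t, M, false)).2.1.length
        = M.length + rest.count v + rest.count (v - 1)) := by
  induction rest with
  | nil => simp
  | cons i rest ih =>
    intro t M
    by_cases h1 : i = v
    · rw [h1]
      simp only [List.foldl_cons]
      rw [step_v]
      rcases ih (t ++ [v]) (M ++ [v]) with ⟨e1, e2⟩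
      refine ⟨?_, ?_⟩
      · rw [e1, List.count_cons_self, List.count_cons_of_ne (show v ≠ v + 1 by omega)]
        simp [List.length_append]; omega
      · rw [e2, List.count_cons_self, List.count_cons_of_ne (show v ≠ v - 1 by omega)]
        simp [List.length_append]; omega
    · by_cases h2 : i = v + 1
      · rw [h2]
        simp only [List.foldl_cons]
        rw [step_v1]
        rcases ih (t ++ [v + 1]) M with ⟨e1, e2⟩
        refine ⟨?_, ?_⟩
        · rw [e1, List.count_cons_of_ne (show v + 1 ≠ v by omega), List.count_cons_self]
          simp [List.length_append]; omega
        · rw [e2, List.count_cons_of_ne (show v + 1 ≠ v by omega),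
              List.count_cons_of_ne (show v + 1 ≠ v - 1 by omega)]
      · by_cases h3 : i = v - 1
        · rw [h3]
          simp only [List.foldl_cons]
          rw [step_vm1]
          rcases ih t (M ++ [v - 1]) with ⟨e1, e2⟩
          refine ⟨?_, ?_⟩
          · rw [e1, List.count_cons_of_ne (show v - 1 ≠ v by omega),
                List.count_cons_of_ne (show v - 1 ≠ v + 1 by omega)]
          · rw [e2, List.count_cons_of_ne (show v - 1 ≠ v by omega), List.count_cons_self]
            simp [List.length_append]; omega
        · simp only [List.foldl_cons]
          rw [step_other v i t M h1 h2 h3]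
          rcases ih t M with ⟨e1, e2⟩
          refine ⟨?_, ?_⟩
          · rw [e1, List.count_cons_of_ne h1, List.count_cons_of_ne h2]
          · rw [e2, List.count_cons_of_ne h1, List.count_cons_of_ne h3]

theorem slice_suffix (a : List Int) (j : Int) (h0 : 0 ≤ j) :
    PySem.List.slice a (some j) (some (a.length : Int)) = a.drop j.toNat := by
  rw [PySem.List.slice_toNat a h0 (Int.natCast_nonneg _)]
  exact List.take_of_length_le (by simp)

-- the two lengths A's inner loop produces at start index j, as counts over the suffix
theorem body_value (a : List Int) (j : Int) (h0 : 0 ≤ j) (hn : j < (a.length : Int)) :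
    ∃ v rest, a.drop j.toNat = v :: rest ∧
      ((PySem.List.slice a (some j) (some (a.length : Int))).foldl
          pickingNumbersStep ([], [], true)).1.length
        = (v :: rest).count v + (v :: rest).count (v + 1) ∧
      ((PySem.List.slice a (some j) (some (a.length : Int))).foldl
          pickingNumbersStep ([], [], true)).2.1.length
        = (v :: rest).count v + (v :: rest).count (v - 1) := by
  have hlt : j.toNat < a.length := by omega
  have hdrop := List.drop_eq_getElem_cons hlt
  refine ⟨a[j.toNat], a.drop (j.toNat + 1), hdrop, ?_, ?_⟩ <;>
    rw [slice_suffix a j h0, hdrop] <;>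
    simp only [List.foldl_cons, show pickingNumbersStep ([], [], true) (a[j.toNat]) =
      ([a[j.toNat]], [a[j.toNat]], false) from by simp [pickingNumbersStep]]
  · rw [(inner_spec (a.drop (j.toNat + 1)) (a[j.toNat]) [] [a[j.toNat]]).1,
        List.count_cons_self, List.count_cons_of_ne (show a[j.toNat] ≠ a[j.toNat] + 1 by omega)]
    simp
    omega
  · rw [(inner_spec (a.drop (j.toNat + 1)) (a[j.toNat]) [] [a[j.toNat]]).2,
        List.count_cons_self, List.count_cons_of_ne (show a[j.toNat] ≠ a[j.toNat] - 1 by omega)]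
    simp; omega

theorem outer_body (a : List Int) (mv j : Int) :
    pickingNumbersOuter a ([], [], true, mv) j
      = ([], [], true, if fA a j > mv then fA a j else mv) := by
  simp only [pickingNumbersOuter, fA]
  refine congrArg (fun x => (([] : List Int), ([] : List Int), true, x)) ?_
  rcases max_cases (((PySem.List.slice a (some j) (some (a.length : Int))).foldl
          pickingNumbersStep ([], [], true)).1.length : Int)
      (((PySem.List.slice a (some j) (some (a.length : Int))).foldl
          pickingNumbersStep ([], [], true)).2.1.length : Int) with ⟨hm, hle⟩ | ⟨hm, hle⟩ <;>
    rw [hm] <;> split_ifs <;> omega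

theorem outer_eq (a : List Int) (js : List Int) (mv : Int) :
    js.foldl (pickingNumbersOuter a) ([], [], true, mv)
      = ([], [], true, js.foldl (fun acc j => if fA a j > acc then fA a j else acc) mv) := by
  induction js generalizing mv with
  | nil => rfl
  | cons j js ih =>
    simp only [List.foldl_cons, outer_body]
    exact ih _

-- B computes the running max of tv a over the distinct values of a
theorem alt_eq (a : List Int) :
    pickingNumbers_alt a
      = (PySem.Set.ofList a).foldl (fun acc v => if tv a v > acc then tv a v else acc) 0 := by
  simp only [pickingNumbers_alt, PySem.Dict.foldl_insert_getD_add_one_eq_counter,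
    PySem.Dict.items_counter, List.foldl_map, PySem.Dict.getD_counter, tv]

-- each inner-loop score is bounded by any upper bound of tv on the members of a
theorem fA_le (a : List Int) (j : Int) (h0 : 0 ≤ j) (hn : j < (a.length : Int)) (R : Int)
    (hub : ∀ v ∈ a, tv a v ≤ R) : fA a j ≤ R := by
  obtain ⟨v, rest, hdrop, e1, e2⟩ := body_value a j h0 hn
  have hvmem : v ∈ a := List.mem_of_mem_drop (hdrop ▸ List.mem_cons_self)
  have hsub : ∀ w, (v :: rest).count w ≤ a.count w := fun w =>
    hdrop ▸ (List.drop_sublist _ _).count_le w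
  have hv : tv a v ≤ R := hub v hvmem
  unfold fA
  rw [e1, e2]
  apply max_le
  · have h1 := hsub v; have h2 := hsub (v + 1)
    unfold tv at hv; push_cast; omega
  · by_cases hw : (v - 1) ∈ a
    · have hvw : tv a (v - 1) ≤ R := hub _ hw
      have h1 := hsub v; have h2 := hsub (v - 1)
      unfold tv at hvw
      rw [show v - 1 + 1 = v by ring] at hvw
      push_cast; omega
    · have hz : a.count (v - 1) = 0 := List.count_eq_zero_of_not_mem hw
      have h1 := hsub v; have h2 := hsub (v - 1)
      unfold tv at hv
      have : (0 : Int) ≤ (a.count (v + 1) : Int) := by positivity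
      push_cast; omega

-- each tv score is realised by A's inner loop at the first index holding v or v+1
theorem tv_le (a : List Int) (v : Int) (hv : v ∈ a) (R : Int)
    (hub : ∀ j : Int, 0 ≤ j → j < (a.length : Int) → fA a j ≤ R) : tv a v ≤ R := by
  have hex : ∃ x ∈ a, (x == v || x == v + 1) = true := ⟨v, hv, by simp⟩
  have hj0 : a.findIdx (fun x => x == v || x == v + 1) < a.length :=
    List.findIdx_lt_length_of_exists hex
  set j0 := a.findIdx (fun x => x == v || x == v + 1) with hj0def
  have hpj0 : (a[j0] == v || a[j0] == v + 1) = true := List.findIdx_getElem (w := hj0)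
  -- no occurrence of v or v+1 before j0, so the suffix holds all of them
  have hcnt : ∀ w : Int, (w == v || w == v + 1) = true → (a.drop j0).count w = a.count w := by
    intro w hw
    have hnot : w ∉ a.take j0 := by
      intro hmem
      have hfalse := List.false_of_mem_take_findIdx hmem
      simp only [hw] at hfalse
      simp at hfalse
    have hsplit : (a.take j0).count w + (a.drop j0).count w = a.count w := by
      rw [← List.count_append, List.take_append_drop]
    have hz : (a.take j0).count w = 0 := List.count_eq_zero_of_not_mem hnot
    omega
  have hR := hub (j0 : Int) (Int.natCast_nonneg _) (by exact_mod_cast hj0)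
  obtain ⟨v', rest, hdrop, e1, e2⟩ := body_value a (j0 : Int) (Int.natCast_nonneg _)
    (by exact_mod_cast hj0)
  rw [Int.toNat_natCast] at hdrop
  have hv' : v' = a[j0] := by
    have h := (List.drop_eq_getElem_cons hj0).symm.trans hdrop
    exact (List.cons.injEq _ _ _ _ ▸ h).1.symm
  have hall : ∀ w : Int, (w == v || w == v + 1) = true →
      List.count w (v' :: rest) = List.count w a := by
    intro w hw
    rw [← hdrop]
    exact hcnt w hw
  rcases Bool.or_eq_true_iff.mp hpj0 with hc | hc
  · -- a[j0] = v : the minarr length at j0 is exactly tv a v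
    have hvv : v' = v := by rw [hv']; exact beq_iff_eq.mp hc
    rw [hvv] at e1 hall
    have hA : tv a v ≤ fA a (j0 : Int) := by
      unfold fA tv
      refine le_trans ?_ (le_max_left _ _)
      rw [e1, hall v (by simp), hall (v + 1) (by simp)]
      push_cast; omega
    exact le_trans hA hR
  · -- a[j0] = v + 1 : the maxarr length at j0 is exactly tv a v
    have hvv : v' = v + 1 := by rw [hv']; exact beq_iff_eq.mp hc
    subst hvv
    have hA : tv a v ≤ fA a (j0 : Int) := by
      unfold fA tv
      refine le_trans ?_ (le_max_right _ _)
      rw [e2, show v + 1 - 1 = v by ring, hall v (by simp), hall (v + 1) (by simp)]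
      push_cast; omega
    exact le_trans hA hR

-- ===== VERDICT (by name: the statement is the Claim_ definition above) =====
theorem pickingNumbers_spec : Claim_equal_pickingNumbers := by
  intro a _
  unfold Spec_pickingNumbers pickingNumbers
  rw [outer_eq, alt_eq]
  simp only []
  obtain ⟨hA0, hAub, hAat⟩ :=
    foldl_max_spec (fA a) (PySem.List.pyRange 0 (a.length : Int) 1) 0
  obtain ⟨hB0, hBub, hBat⟩ := foldl_max_spec (tv a) (PySem.Set.ofList a) 0
  apply le_antisymm
  · rcases hAat with h | ⟨j, hj, h⟩
    · rw [h]; exact hB0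
    · rw [h]
      have hjr := (PySem.List.mem_pyRange_one).mp hj
      exact fA_le a j hjr.1 hjr.2 _ (fun v hv => hBub v ((PySem.Set.mem_ofList a v).mpr hv))
  · rcases hBat with h | ⟨v, hv, h⟩
    · rw [h]; exact hA0
    · rw [h]
      refine tv_le a v ((PySem.Set.mem_ofList a v).mp hv) _ (fun j hj0 hjn => ?_)
      exact hAub j ((PySem.List.mem_pyRange_one).mpr ⟨hj0, hjn⟩)
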